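/- GENERATED by c/gen_decode.py: decode facts of the image, one per distinct instruction byte string. -/
import UserX.DecodeImage

#decode_all Vorbis.Dec
  "036b54"  -- add ebp,DWORD PTR [rbx+0x54]
  "0f8411010000"  -- je 113b7a
  "0f84d4010000"  -- je 11483c
  "0f8794000000"  -- ja 10d4f6
  "0f8eb8000000"  -- jle 1155be
  "0fb65b01"  -- movzx ebx,BYTE PTR [rbx+0x1]
  "38442418"  -- cmp BYTE PTR [rsp+0x18],al
  "410f47dd"  -- cmova ebx,r13d
  "4139c4"  -- cmp r12d,eax
  "4183fc1f"  -- cmp r12d,0x1f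
  "4189fe"  -- mov r14d,edi
  "41c1f803"  -- sar r8d,0x3
  "42896cbc50"  -- mov DWORD PTR [rsp+r15*4+0x50],ebp
  "44397304"  -- cmp DWORD PTR [rbx+0x4],r14d
  "448965b0"  -- mov DWORD PTR [rbp-0x50],r12d
  "4489e1"  -- mov ecx,r12d
  "448b7c2450"  -- mov r15d,DWORD PTR [rsp+0x50]
  "450fb7646f02"  -- movzx r12d,WORD PTR [r15+rbp*2+0x2]
  "4589f0"  -- mov r8d,r14d
  "47886c3409"  -- mov BYTE PTR [r12+r14*1+0x9],r13b
  "48634590"  -- movsxd rax,DWORD PTR [rbp-0x70]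
  "4881c7a8000000"  -- add rdi,0xa8
  "4885db"  -- test rbx,rbx
  "4889c5"  -- mov rbp,rax
  "488b5c2410"  -- mov rbx,QWORD PTR [rsp+0x10]
  "488d048517000000"  -- lea rax,[rax*4+0x17]
  "488d780c"  -- lea rdi,[rax+0xc]
  "488d7df8"  -- lea rdi,[rbp-0x8]
  "488dbbd4060000"  -- lea rdi,[rbx+0x6d4]
  "488dbf8c000000"  -- lea rdi,[rdi+0x8c]
  "48c7811400c00000000000"  -- mov QWORD PTR [rcx+0xc00014],0x0
  "49635604"  -- movsxd rdx,DWORD PTR [r14+0x4]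
  "4989dd"  -- mov r13,rbx
  "498d7c24e4"  -- lea rdi,[r12-0x1c]
  "498dbea8000000"  -- lea rdi,[r14+0xa8]
  "4a8d7cb450"  -- lea rdi,[rsp+r14*4+0x50]
  "4c03b3a8000000"  -- add r14,QWORD PTR [rbx+0xa8]
  "4c89bd58ffffff"  -- mov QWORD PTR [rbp-0xa8],r15
  "4c8b7dc0"  -- mov r15,QWORD PTR [rbp-0x40]
  "4c8dadb4000000"  -- lea r13,[rbp+0xb4]
  "4d8ba5a8000000"  -- mov r12,QWORD PTR [r13+0xa8]
  "660f28cd"  -- movapd xmm1,xmm5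
  "66410f6ee5"  -- movd xmm4,r13d
  "66490f6ec7"  -- movq xmm0,r15
  "741c"  -- je 111a23
  "7506"  -- jne 10823c
  "772b"  -- ja 102d11
  "7e07"  -- jle 100c27
  "7fbb"  -- jg 1118f4
  "838568ffffff01"  -- add DWORD PTR [rbp-0x98],0x1
  "85f6"  -- test esi,esi
  "896c243c"  -- mov DWORD PTR [rsp+0x3c],ebp
  "89ee"  -- mov esi,ebp
  "8b55b0"  -- mov edx,DWORD PTR [rbp-0x50]
  "8b8d6cffffff"  -- mov ecx,DWORD PTR [rbp-0x94]
  "b8ffffffff"  -- mov eax,0xffffffff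
  "c1e802"  -- shr eax,0x2
  "c780c400c000f2f2f2f2"  -- mov DWORD PTR [rax+0xc000c4],0xf2f2f2f2
  "d3f8"  -- sar eax,cl
  "e809a7feff"  -- call 100720
  "e8132effff"  -- call 100300
  "e81c78ffff"  -- call 10d1c0
  "e82794ffff"  -- call 100640
  "e82f91ffff"  -- call 100800
  "e839aeffff"  -- call 100640
  "e844fffeff"  -- call 103d00
  "e84f7dffff"  -- call 10d1c0
  "e85ac3feff"  -- call 1003c0
  "e8693bffff"  -- call 100300
  "e873f6ffff"  -- call 100059
  "e87e33ffff"  -- call 108f20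
  "e889c9feff"  -- call 1003c0
  "e893acfeff"  -- call 100720
  "e89d9ffeff"  -- call 100560
  "e8a830ffff"  -- call 103d00
  "e8b1d3feff"  -- call 100720
  "e8bbd3ffff"  -- call 110b00
  "e8c6eafeff"  -- call 100640
  "e8d075ffff"  -- call 10d1c0
  "e8daa4ffff"  -- call 100640
  "e8e430ffff"  -- call 108f20
  "e8ecbaffff"  -- call 100300
  "e8f6b9ffff"  -- call 100480
  "e909e8ffff"  -- jmp 113b22
  "e94bffffff"  -- jmp 10fa53
  "e9a2d7ffff"  -- jmp 113b22
  "e9f2030000"  -- jmp 10a164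
  "eb81"  -- jmp 10e612
  "ebe0"  -- jmp 104152
  "f20f5805afd70100"  -- addsd xmm0,QWORD PTR [rip+0x1d7af]
  "f20f5e1560e00100"  -- divsd xmm2,QWORD PTR [rip+0x1e060]
  "f30f10531c"  -- movss xmm2,DWORD PTR [rbx+0x1c]
  "f30f10742418"  -- movss xmm6,DWORD PTR [rsp+0x18]
  "f30f11500c"  -- movss DWORD PTR [rax+0xc],xmm2
  "f30f1175a8"  -- movss DWORD PTR [rbp-0x58],xmm6
  "f30f58dd"  -- addss xmm3,xmm5
  "f30f59ee"  -- mulss xmm5,xmm6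
  "f3410f10442404"  -- movss xmm0,DWORD PTR [r12+0x4]
  "f3410f590f"  -- mulss xmm1,DWORD PTR [r15]
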